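-- pv_equiv track=rewrite | github.com/ahadaso042/CPS109Labs | labs109.py | knight_jump
-- ===== SOURCE A (Python) =====
-- def knight_jump(knight, start, end):
--     knight = list(knight)
--     knight.sort()
--     arr = []
--     for i in range(len(start)):
--         arr.append(abs(start[i] - end[i]))
--         arr.sort()
--     if arr == knight:
--         return True
--     else:
--         return False
-- ===== SOURCE B (Python) =====
-- def knight_jump(knight, start, end):
--     ca = {}
--     for i in range(len(start)):
--         d = abs(start[i] - end[i])
--         ca[d] = ca.get(d, 0) + 1
--     ck = {}
--     for m in knight:
--         ck[m] = ck.get(m, 0) + 1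
--     return ca == ck
-- ===== Notes on version B (the rewrite author's own statement) =====
-- stated objective: faster
-- what changed: Replaces A's re-sort-after-every-append plus sorted-list comparison by two frequency dictionaries compared as multisets, with no sorting at all.
import Mathlib
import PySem

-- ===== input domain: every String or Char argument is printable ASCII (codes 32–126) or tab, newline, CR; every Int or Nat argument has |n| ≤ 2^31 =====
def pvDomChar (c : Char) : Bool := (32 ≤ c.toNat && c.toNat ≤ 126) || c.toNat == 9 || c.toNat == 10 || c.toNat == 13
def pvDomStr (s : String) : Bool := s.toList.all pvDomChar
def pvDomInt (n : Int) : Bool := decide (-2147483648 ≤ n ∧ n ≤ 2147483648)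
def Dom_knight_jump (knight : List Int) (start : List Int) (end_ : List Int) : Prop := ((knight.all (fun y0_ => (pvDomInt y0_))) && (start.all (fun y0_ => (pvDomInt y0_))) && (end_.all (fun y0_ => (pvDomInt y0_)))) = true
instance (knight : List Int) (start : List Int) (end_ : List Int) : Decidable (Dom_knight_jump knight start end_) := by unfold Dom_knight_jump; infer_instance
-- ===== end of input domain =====

-- B replaces A's sort-inside-the-loop + sorted-list comparison by two frequency
-- dictionaries compared as multisets (no sorting); return values proved equal on Pre_.

-- ===== PORT A =====
-- literal port of A: copy+sort knight, loop appending |start[i]-end[i]| and re-sorting arr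
-- each iteration, then compare the lists; 'none' threads the IndexError of end[i].
def knight_jump (knight : List Int) (start : List Int) (end_ : List Int) : Bool :=
  let knightS := PySem.List.sorted knight (fun x => x) false
  let arr? : Option (List Int) :=
    (PySem.List.pyRange 0 (start.length : Int) 1).foldl
      (fun acc i =>
        match acc, PySem.List.pyGet? start i, PySem.List.pyGet? end_ i with
        | some a, some s, some e => some (PySem.List.sorted (a ++ [|s - e|]) (fun x => x) false)
        | _, _, _ => none)
      (some [])
  match arr? with
  | some a => decide (a = knightS)
  | none => false

-- ===== PORT B =====
-- literal port of B: frequency dict of the abs diffs, frequency dict of knight,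
-- Python dict == (order-insensitive: same key set, same values).
def knight_jump_alt (knight : List Int) (start : List Int) (end_ : List Int) : Bool :=
  let ca? : Option (PySem.Dict Int Int) :=
    (PySem.List.pyRange 0 (start.length : Int) 1).foldl
      (fun acc i =>
        acc.bind fun d =>
          (PySem.List.pyGet? start i).bind fun s =>
            (PySem.List.pyGet? end_ i).map fun e =>
              d.insert |s - e| (d.getD |s - e| 0 + 1))
      (some PySem.Dict.empty)
  let ck := knight.foldl (fun d m => d.insert m (d.getD m 0 + 1)) PySem.Dict.empty
  (ca?.map fun ca =>
      PySem.Set.equal ca.keys ck.keys && ca.keys.all (fun k => ca.getD k 0 == ck.getD k 0)).getD false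

-- ===== PRECONDITION & SPEC =====
-- end[i] raises IndexError when len(end) < len(start); exactly those inputs are excluded.
def Pre_knight_jump (knight : List Int) (start : List Int) (end_ : List Int) : Prop :=
  start.length ≤ end_.length
instance (knight : List Int) (start : List Int) (end_ : List Int) : Decidable (Pre_knight_jump knight start end_) := by unfold Pre_knight_jump; infer_instance
def pvWitness_knight_jump : List Int × List Int × List Int := ([1, 2], [0, 0], [2, 1])

def Spec_knight_jump (knight : List Int) (start : List Int) (end_ : List Int) (out : Bool) : Prop := out = knight_jump_alt knight start end_
instance (knight : List Int) (start : List Int) (end_ : List Int) (out : Bool) : Decidable (Spec_knight_jump knight start end_ out) := by unfold Spec_knight_jump; infer_instance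

-- ===== CLAIM (what is proved, stated in full; the proofs are below) =====
def Claim_equal_knight_jump : Prop := ∀ (knight : List Int) (start : List Int) (end_ : List Int), Dom_knight_jump knight start end_ → Pre_knight_jump knight start end_ → Spec_knight_jump knight start end_ (knight_jump knight start end_)

-- ===== LEMMAS AND PROOFS =====

theorem pvGet_some_of_lt {xs : List Int} {i : Int} (h0 : 0 ≤ i) (h : i < (xs.length : Int)) :
    PySem.List.pyGet? xs i = some (PySem.List.pyGetD xs i 0) := by
  simp [PySem.List.pyGet?, PySem.List.pyGetD, PySem.List.pyIdx?, h0, h]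

-- A's fold computes some (sorted of the accumulated diffs)
theorem pvA_fold (start end_ : List Int) (l : List Int)
    (hl : ∀ i ∈ l, 0 ≤ i ∧ i < (start.length : Int) ∧ i < (end_.length : Int))
    (a : List Int) :
    l.foldl
      (fun acc i =>
        match acc, PySem.List.pyGet? start i, PySem.List.pyGet? end_ i with
        | some a, some s, some e => some (PySem.List.sorted (a ++ [|s - e|]) (fun x => x) false)
        | _, _, _ => none)
      (some (PySem.List.sorted a (fun x => x) false)) =
    some (PySem.List.sorted
      (a ++ l.map (fun i => |PySem.List.pyGetD start i 0 - PySem.List.pyGetD end_ i 0|))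
      (fun x => x) false) := by
  induction l generalizing a with
  | nil => simp
  | cons i t ih =>
    obtain ⟨h0, h1, h2⟩ := hl i (by simp)
    simp only [List.foldl_cons, pvGet_some_of_lt h0 h1, pvGet_some_of_lt h0 h2]
    have hs : PySem.List.sorted
        (PySem.List.sorted a (fun x => x) false ++ [|PySem.List.pyGetD start i 0 - PySem.List.pyGetD end_ i 0|])
        (fun x => x) false =
        PySem.List.sorted (a ++ [|PySem.List.pyGetD start i 0 - PySem.List.pyGetD end_ i 0|]) (fun x => x) false := by
      apply PySem.List.sorted_eq_sorted_of_perm _ _ _ (fun x y h => h)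
      exact (PySem.List.sorted_perm a (fun x => x) false).append_right _
    rw [hs, ih (fun j hj => hl j (by simp [hj]))]
    simp

-- B's dict fold computes some (counter of the diffs)
theorem pvB_fold (start end_ : List Int) (l : List Int)
    (hl : ∀ i ∈ l, 0 ≤ i ∧ i < (start.length : Int) ∧ i < (end_.length : Int))
    (d : PySem.Dict Int Int) :
    l.foldl
      (fun acc i =>
        acc.bind fun d =>
          (PySem.List.pyGet? start i).bind fun s =>
            (PySem.List.pyGet? end_ i).map fun e =>
              d.insert |s - e| (d.getD |s - e| 0 + 1))
      (some d) =
    some ((l.map (fun i => |PySem.List.pyGetD start i 0 - PySem.List.pyGetD end_ i 0|)).foldl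
      (fun d x => d.insert x (d.getD x 0 + 1)) d) := by
  induction l generalizing d with
  | nil => simp
  | cons i t ih =>
    obtain ⟨h0, h1, h2⟩ := hl i (by simp)
    simp only [List.foldl_cons, pvGet_some_of_lt h0 h1, pvGet_some_of_lt h0 h2]
    exact ih (fun j hj => hl j (by simp [hj])) _

-- multiset equality via membership-equality + count-equality on members
theorem pvPerm_iff (xs ys : List Int) :
    ((∀ v, v ∈ xs ↔ v ∈ ys) ∧ ∀ v ∈ xs, xs.count v = ys.count v) ↔ xs.Perm ys := by
  constructor
  · rintro ⟨hm, hc⟩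
    rw [List.perm_iff_count]
    intro v
    by_cases hv : v ∈ xs
    · exact hc v hv
    · rw [List.count_eq_zero_of_not_mem hv,
        List.count_eq_zero_of_not_mem (fun h => hv ((hm v).2 h))]
  · intro h
    exact ⟨fun v => ⟨fun hv => h.mem_iff.1 hv, fun hv => h.mem_iff.2 hv⟩,
      fun v _ => h.count_eq v⟩

theorem pv_indices_ok (start end_ : List Int) (h : start.length ≤ end_.length) :
    ∀ i ∈ PySem.List.pyRange 0 (start.length : Int) 1,
      0 ≤ i ∧ i < (start.length : Int) ∧ i < (end_.length : Int) := by
  intro i hi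
  have := (PySem.List.mem_pyRange_one (a := 0) (b := (start.length : Int)) (x := i)).1 hi
  refine ⟨this.1, this.2, ?_⟩
  omega

-- ===== VERDICT (by name: the statement is the Claim_ definition above) =====
theorem knight_jump_spec : Claim_equal_knight_jump := by
  intro knight start end_ _ hpre
  unfold Spec_knight_jump knight_jump knight_jump_alt
  have hidx := pv_indices_ok start end_ hpre
  have hA := pvA_fold start end_ _ hidx []
  have hB := pvB_fold start end_ _ hidx PySem.Dict.empty
  rw [show (PySem.List.sorted ([] : List Int) (fun x => x) false) = [] from rfl] at hA
  simp only [hA, hB, List.nil_append]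
  rw [PySem.Dict.foldl_insert_getD_add_one_eq_counter,
      PySem.Dict.foldl_insert_getD_add_one_eq_counter]
  set ds := (PySem.List.pyRange 0 (start.length : Int) 1).map
    (fun i => |PySem.List.pyGetD start i 0 - PySem.List.pyGetD end_ i 0|) with hds
  -- A side: sorted ds = sorted knight ↔ ds.Perm knight
  simp only [Option.map_some, Option.getD_some]
  rw [PySem.Dict.keys_counter, PySem.Dict.keys_counter]
  rcases Bool.eq_false_or_eq_true (PySem.Set.equal (PySem.Set.ofList ds) (PySem.Set.ofList knight) &&
      (PySem.Set.ofList ds).all (fun k => (PySem.Dict.counter ds).getD k 0 == (PySem.Dict.counter knight).getD k 0)) with hb | hb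
  · rw [hb]
    -- B is true: the two components give perm
    have hperm : ds.Perm knight := by
      rw [← pvPerm_iff]
      simp only [Bool.and_eq_true, List.all_eq_true, PySem.Set.equal_iff, beq_iff_eq] at hb
      constructor
      · intro v
        have := hb.1 v
        simpa [PySem.Set.mem_ofList] using this
      · intro v hv
        have := hb.2 v (by simp [PySem.Set.mem_ofList, hv])
        simp only [PySem.Dict.getD_counter] at this
        exact_mod_cast this
    simp [PySem.List.sorted_id_eq_sorted_id_iff_perm, hperm]
  · rw [hb]
    -- B is false → not perm → sorted lists differ
    rw [Bool.and_eq_false_iff] at hb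
    have hnp : ¬ ds.Perm knight := by
      intro hp
      have h2 := (pvPerm_iff ds knight).2 hp
      rcases hb with hb | hb
      · have hb' : ¬ (∀ x, x ∈ PySem.Set.ofList ds ↔ x ∈ PySem.Set.ofList knight) := by
          rw [← PySem.Set.equal_iff]; simp [hb]
        exact hb' (fun x => by simpa [PySem.Set.mem_ofList] using h2.1 x)
      · rw [List.all_eq_false] at hb
        obtain ⟨k, hk, hkne⟩ := hb
        rw [PySem.Set.mem_ofList] at hk
        simp only [PySem.Dict.getD_counter, beq_iff_eq] at hkne
        exact hkne (by exact_mod_cast h2.2 k hk)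
    simp [PySem.List.sorted_id_eq_sorted_id_iff_perm, hnp]
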